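-- pv_equiv track=rewrite | github.com/andres280699/Post-Mortem | APP roma/Calculo/reglas.py | calcular_salud
-- ===== SOURCE A (Python) =====
-- def calcular_salud(nivel):
--     salud = 50
--     for n in range(2, nivel + 1):
--         if n <= 10:
--             salud += 10
--         elif n <= 50:
--             salud += (n - 1) ** 2
--         else:
--             salud += (n - 1) ** 3
--     return salud
-- ===== SOURCE B (Python) =====
-- def calcular_salud(nivel):
--     # Closed-form: per-level bonus is 10 for levels 2..10, (n-1)^2 for 11..50,
--     # (n-1)^3 above; summed via arithmetic / square / cube series formulas.
--     if nivel <= 1: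
--         return 50
--     if nivel <= 10:
--         return 50 + 10 * (nivel - 1)
--     m = nivel - 1
--     sq = m * (m + 1) * (2 * m + 1) // 6   # sum of squares 1..m
--     if nivel <= 50:
--         return 140 + sq - 285
--     cb = (49 * 50 // 2) ** 2              # sum of cubes 1..49
--     cbm = (m * (m + 1) // 2) ** 2         # sum of cubes 1..m
--     sq49 = 49 * 50 * 99 // 6
--     return 140 + sq49 - 285 + cbm - cb
-- ===== Notes on version B (the rewrite author's own statement) =====
-- stated objective: faster
-- what changed: Replaced the per-level accumulation loop with O(1) closed-form series sums (arithmetic series, sum of squares, sum of cubes) over the three piecewise ranges.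
import Mathlib
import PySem

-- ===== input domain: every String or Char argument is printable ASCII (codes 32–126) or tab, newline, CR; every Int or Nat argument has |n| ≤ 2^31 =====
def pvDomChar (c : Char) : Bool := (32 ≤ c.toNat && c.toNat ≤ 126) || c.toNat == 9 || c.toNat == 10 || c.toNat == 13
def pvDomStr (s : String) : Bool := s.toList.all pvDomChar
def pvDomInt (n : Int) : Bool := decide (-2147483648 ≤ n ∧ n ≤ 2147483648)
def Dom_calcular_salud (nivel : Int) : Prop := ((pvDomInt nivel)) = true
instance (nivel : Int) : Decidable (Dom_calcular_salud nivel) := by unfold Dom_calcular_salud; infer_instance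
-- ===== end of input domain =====

-- B replaces A's O(nivel) per-level loop by O(1) closed-form series sums (arithmetic, squares, cubes) over the piecewise ranges.

-- ===== PORT A =====
def calcular_salud (nivel : Int) : Int :=
  (PySem.List.pyRange 2 (nivel + 1)).foldl
    (fun salud n =>
      if n ≤ 10 then salud + 10
      else if n ≤ 50 then salud + (n - 1) ^ 2
      else salud + (n - 1) ^ 3) 50

-- ===== PORT B =====
def calcular_salud_alt (nivel : Int) : Int :=
  if nivel ≤ 1 then 50
  else if nivel ≤ 10 then 50 + 10 * (nivel - 1)
  else
    let m := nivel - 1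
    let sq := PySem.Int.floordiv (m * (m + 1) * (2 * m + 1)) 6
    if nivel ≤ 50 then 140 + sq - 285
    else
      let cb := (PySem.Int.floordiv (49 * 50) 2) ^ 2
      let cbm := (PySem.Int.floordiv (m * (m + 1)) 2) ^ 2
      let sq49 := PySem.Int.floordiv (49 * 50 * 99) 6
      140 + sq49 - 285 + cbm - cb

-- ===== PRECONDITION & SPEC =====
def Spec_calcular_salud (nivel : Int) (out : Int) : Prop := out = calcular_salud_alt nivel
instance (nivel : Int) (out : Int) : Decidable (Spec_calcular_salud nivel out) := by unfold Spec_calcular_salud; infer_instance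

-- ===== CLAIM (what is proved, stated in full; the proofs are below) =====
def Claim_equal_calcular_salud : Prop := ∀ (nivel : Int), Dom_calcular_salud nivel → Spec_calcular_salud nivel (calcular_salud nivel)

-- ===== LEMMAS AND PROOFS =====

-- the per-level bonus added by A's loop at level n
def pvInc (n : Int) : Int := if n ≤ 10 then 10 else if n ≤ 50 then (n - 1) ^ 2 else (n - 1) ^ 3

lemma pvA_base (nivel : Int) (h : nivel ≤ 1) : calcular_salud nivel = 50 := by
  unfold calcular_salud
  rw [PySem.List.pyRange_one_eq_nil (by omega)]
  rfl

lemma pvA_step (k : Int) (hk : 1 ≤ k) :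
    calcular_salud (k + 1) = calcular_salud k + pvInc (k + 1) := by
  unfold calcular_salud
  rw [PySem.List.pyRange_one_succ_right (by omega : (2:Int) ≤ k + 1), List.foldl_append]
  simp only [List.foldl_cons, List.foldl_nil, pvInc]
  split_ifs <;> rfl

lemma pvB_step (k : Int) (hk : 1 ≤ k) :
    calcular_salud_alt (k + 1) = calcular_salud_alt k + pvInc (k + 1) := by
  rcases lt_or_ge k 10 with h10 | h10
  · -- 1 ≤ k ≤ 9 : both linear branches
    unfold calcular_salud_alt pvInc
    split_ifs <;> omega
  rcases lt_or_ge k 50 with h50 | h50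
  · -- 10 ≤ k ≤ 49 : squares branch
    rcases eq_or_lt_of_le h10 with h10e | h10l
    · subst k; decide
    · -- 11 ≤ k ≤ 49
      unfold calcular_salud_alt pvInc
      split_ifs with h1 h2 h3 h4 h5 h6 h7 <;> try omega
      simp only
      have hx : k * (k + 1) * (2 * k + 1) = (k - 1) * (k - 1 + 1) * (2 * (k - 1) + 1) + k ^ 2 * 6 := by ring
      simp only [PySem.Int.floordiv_eq_ediv_of_pos (show (0:Int) < 6 by norm_num)]
      rw [show k + 1 - 1 = k from by ring, hx,
        Int.add_mul_ediv_right _ _ (by norm_num : (6:Int) ≠ 0)]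
      ring
  rcases eq_or_lt_of_le h50 with h50e | h50l
  · subst k; decide
  · -- 51 ≤ k : cubes branch
    unfold calcular_salud_alt pvInc
    split_ifs with h1 h2 h3 h4 h5 h6 h7 <;> try omega
    simp only
    have hx : k * (k + 1) = (k - 1) * (k - 1 + 1) + k * 2 := by ring
    simp only [PySem.Int.floordiv_eq_ediv_of_pos (show (0:Int) < 2 by norm_num),
      PySem.Int.floordiv_eq_ediv_of_pos (show (0:Int) < 6 by norm_num)]
    rw [show k + 1 - 1 = k from by ring, hx,
      Int.add_mul_ediv_right _ _ (by norm_num : (2:Int) ≠ 0)]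
    have hev : (2:Int) ∣ (k - 1) * (k - 1 + 1) := (Int.even_mul_succ_self (k - 1)).two_dvd
    have hdc : (k - 1) * (k - 1 + 1) / 2 * 2 = (k - 1) * (k - 1 + 1) := Int.ediv_mul_cancel hev
    nlinarith [hdc]

lemma pvMain (m : Nat) : calcular_salud (1 + m) = calcular_salud_alt (1 + m) := by
  induction m with
  | zero => decide
  | succ n ih =>
    have h : (1 : Int) + ((n + 1 : Nat) : Int) = (1 + (n : Int)) + 1 := by push_cast; ring
    rw [h, pvA_step _ (by omega), pvB_step _ (by omega), ih]

-- ===== VERDICT (by name: the statement is the Claim_ definition above) =====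
theorem calcular_salud_spec : Claim_equal_calcular_salud := by
  intro nivel _
  unfold Spec_calcular_salud
  rcases le_or_gt nivel 1 with h | h
  · rw [pvA_base nivel h]
    unfold calcular_salud_alt
    rw [if_pos h]
  · have hm : nivel = 1 + ((nivel - 1).toNat : Int) := by omega
    rw [hm]
    exact pvMain (nivel - 1).toNat
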